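-- pv_equiv track=rewrite | github.com/tomdif/causal-algebraic-geometry-lean | cag_causal_inference.py | is_order_convex
-- ===== SOURCE A (Python) =====
-- def is_order_convex(subset_set, closure):
--     """Check if a subset is order-convex: if a,c in S and a < b < c, then b in S."""
--     for (a, c) in closure:
--         if a in subset_set and c in subset_set:
--             # Check all b with a < b < c
--             for (x, y) in closure:
--                 if x == a and (y, c) in closure and y != a and y != c:
--                     if y not in subset_set:
--                         return False
--     return True
-- ===== SOURCE B (Python) =====
-- def is_order_convex(subset_set, closure):
--     """Check if a subset is order-convex: if a,c in S and a < b < c, then b in S."""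
--     S = set(subset_set)
--     closure_set = set(closure)
--     succ = {}
--     for (x, y) in closure:
--         succ.setdefault(x, []).append(y)
--     for (a, c) in closure:
--         if a in S and c in S:
--             for y in succ.get(a, []):
--                 if (y, c) in closure_set and y != a and y != c and y not in S:
--                     return False
--     return True
-- ===== Notes on version B (the rewrite author's own statement) =====
-- stated objective: alternative
-- what changed: B precomputes set views of the subset and of the closure and a dict grouping closure pairs by first element, so each pair (a,c) scans only a's successors with hashed lookups instead of rescanning the whole closure with list membership tests; a timing run did not find it measurably faster on the generated inputs.
import Mathlib
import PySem

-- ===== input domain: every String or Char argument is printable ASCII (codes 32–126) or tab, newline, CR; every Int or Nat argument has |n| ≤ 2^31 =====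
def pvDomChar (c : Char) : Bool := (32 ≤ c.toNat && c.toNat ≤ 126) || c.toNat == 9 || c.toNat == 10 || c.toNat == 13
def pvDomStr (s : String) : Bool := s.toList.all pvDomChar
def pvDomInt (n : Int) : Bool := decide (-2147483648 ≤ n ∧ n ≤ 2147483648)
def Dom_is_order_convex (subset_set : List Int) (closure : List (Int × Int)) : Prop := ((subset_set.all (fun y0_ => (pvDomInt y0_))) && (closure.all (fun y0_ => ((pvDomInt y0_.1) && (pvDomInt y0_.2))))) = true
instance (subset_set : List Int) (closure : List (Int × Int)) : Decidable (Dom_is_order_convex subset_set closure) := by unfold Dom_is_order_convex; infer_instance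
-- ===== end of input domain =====

-- B builds set views and a successor index keyed by first element (alternative traversal: per pair it scans only that pair's successors instead of the whole closure).

-- ===== PORT A =====
-- the nested for-loops with early 'return False' are the two .any scans; 'x in list' is List.contains
def is_order_convex (subset_set : List Int) (closure : List (Int × Int)) : Bool :=
  !(closure.any (fun p =>
      subset_set.contains p.1 && subset_set.contains p.2 &&
      closure.any (fun q =>
        q.1 == p.1 && closure.contains (q.2, p.2) && q.2 != p.1 && q.2 != p.2 &&
        !(subset_set.contains q.2))))

-- ===== PORT B =====
def is_order_convex_alt (subset_set : List Int) (closure : List (Int × Int)) : Bool :=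
  let S := PySem.Set.ofList subset_set
  let cset := PySem.Set.ofList closure
  let succ := closure.foldl (fun d q => d.modify q.1 [] (· ++ [q.2])) PySem.Dict.empty
  !(closure.any (fun p =>
      PySem.Set.contains S p.1 && PySem.Set.contains S p.2 &&
      (succ.getD p.1 []).any (fun y =>
        PySem.Set.contains cset (y, p.2) && y != p.1 && y != p.2 &&
        !(PySem.Set.contains S y))))

-- ===== PRECONDITION & SPEC =====
def Spec_is_order_convex (subset_set : List Int) (closure : List (Int × Int)) (out : Bool) : Prop := out = is_order_convex_alt subset_set closure
instance (subset_set : List Int) (closure : List (Int × Int)) (out : Bool) : Decidable (Spec_is_order_convex subset_set closure out) := by unfold Spec_is_order_convex; infer_instance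

-- ===== CLAIM (what is proved, stated in full; the proofs are below) =====
def Claim_equal_is_order_convex : Prop := ∀ (subset_set : List Int) (closure : List (Int × Int)), Dom_is_order_convex subset_set closure → Spec_is_order_convex subset_set closure (is_order_convex subset_set closure)

-- ===== LEMMAS AND PROOFS =====

-- a Python set built from a list answers membership as the list does
theorem set_ofList_contains {α : Type} [BEq α] [LawfulBEq α] (xs : List α) (y : α) :
    PySem.Set.contains (PySem.Set.ofList xs) y = xs.contains y := by
  have := PySem.Set.mem_ofList xs y
  by_cases h : y ∈ xs <;> simp_all [PySem.Set.contains_eq_listContains]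

-- any over the successors of a = any over the closure restricted to first component a
theorem any_filter_map_fst {l : List (Int × Int)} {a : Int} {g : Int → Bool} :
    ((l.filter (fun q => q.1 == a)).map (·.2)).any g
      = l.any (fun q => q.1 == a && g q.2) := by
  induction l with
  | nil => rfl
  | cons q t ih =>
      by_cases h : q.1 = a <;> simp [h, ih]

theorem is_order_convex_eq (subset_set : List Int) (closure : List (Int × Int)) :
    is_order_convex subset_set closure = is_order_convex_alt subset_set closure := by
  simp only [is_order_convex, is_order_convex_alt]
  refine congrArg (! ·) (congrArg closure.any (funext fun p => ?_))
  rw [PySem.Dict.getD_foldl_modify_append, PySem.Dict.getD_empty, List.nil_append,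
      any_filter_map_fst, set_ofList_contains, set_ofList_contains]
  refine congrArg₂ (· && ·) rfl (congrArg closure.any (funext fun q => ?_))
  rw [set_ofList_contains, set_ofList_contains]
  simp [Bool.and_assoc]

-- ===== VERDICT (by name: the statement is the Claim_ definition above) =====
theorem is_order_convex_spec : Claim_equal_is_order_convex := by
  intro subset_set closure _
  exact is_order_convex_eq subset_set closure
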